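-- pv_equiv track=rewrite | github.com/RezSat/GeneratedAlgorithms | posts/prime-factor-sequence.py | prime_factor_sequence
-- ===== SOURCE A (Python) =====
-- def prime_factor_sequence(limit, seed):
--     """
--     Generates a sequence of numbers based on the prime factors of numbers up to a limit,
--     influenced by an initial seed value.
--
--     For each number, it finds the prime factors, sums them, and then applies a simple
--     formula involving the seed to generate the next number in the sequence. This aims
--     to create a sequence that is deterministic given the seed and limit, but appears
--     random and is sensitive to changes in the seed.
--     """
--     sequence = []
--     current = seed
--     for i in range(2, limit + 1):
--         factors = []
--         n = i
--         d = 2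
--         while d * d <= n:
--             while n % d == 0:
--                 factors.append(d)
--                 n //= d
--             d += 1
--         if n > 1:
--             factors.append(n)
--
--         if factors:
--             factor_sum = sum(factors)
--             current = (current + factor_sum * seed) % limit
--         else:
--             current = (current + seed) % limit
--         sequence.append(current)
--     return sequence
-- ===== SOURCE B (Python) =====
-- def _sopf(n):
--     """Sum of prime factors of n with multiplicity, by recursion on the
--     smallest factor."""
--     if n < 2:
--         return 0
--     d = 2
--     while d * d <= n and n % d:
--         d += 1
--     p = d if d * d <= n else n
--     return p + _sopf(n // p)
--
--
-- def prime_factor_sequence(limit, seed):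
--     # Each output entry is seed * (1 + sopf(2) + ... + sopf(i)) mod limit:
--     # the modular recurrence telescopes, so no running 'current' is needed.
--     total = 1
--     out = []
--     for i in range(2, limit + 1):
--         total += _sopf(i)
--         out.append(seed * total % limit)
--     return out
-- ===== Notes on version B (the rewrite author's own statement) =====
-- stated objective: alternative
-- what changed: B drops A's running modular accumulator by telescoping the recurrence into the closed form seed*(1 + sopf(2)+...+sopf(i)) % limit, and computes each sum of prime factors by recursion on the smallest factor with a single merged search loop instead of A's nested stripping whiles.
import Mathlib
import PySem

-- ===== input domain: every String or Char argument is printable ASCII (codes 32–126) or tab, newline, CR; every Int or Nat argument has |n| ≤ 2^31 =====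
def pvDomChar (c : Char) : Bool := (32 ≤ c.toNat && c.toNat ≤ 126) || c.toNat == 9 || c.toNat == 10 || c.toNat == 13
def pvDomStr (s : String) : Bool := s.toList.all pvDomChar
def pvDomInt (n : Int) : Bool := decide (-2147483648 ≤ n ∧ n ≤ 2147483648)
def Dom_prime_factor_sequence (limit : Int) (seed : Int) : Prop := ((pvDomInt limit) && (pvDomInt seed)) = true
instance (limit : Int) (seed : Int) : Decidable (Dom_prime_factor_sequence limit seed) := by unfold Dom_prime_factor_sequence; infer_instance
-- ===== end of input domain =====

-- B replaces A's running modular accumulator by the telescoped form seed*(1+Σ sopf(i)) % limit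
-- and computes each sum of prime factors by recursion on the smallest factor (objective: alternative).


-- ===== PORT A =====
-- inner `while n % d == 0` loop of A (fuel makes the recursion structural; it is
-- always large enough on the inputs reached)
def pvInnerA (fuel : Nat) (d n : Int) (factors : List Int) : List Int × Int :=
  match fuel with
  | 0 => (factors, n)
  | f + 1 =>
    if PySem.Int.mod n d = 0 then
      pvInnerA f d (PySem.Int.floordiv n d) (factors ++ [d])
    else (factors, n)

-- outer `while d * d <= n` loop of A
def pvOuterA (fuel : Nat) (d n : Int) (factors : List Int) : List Int × Int :=
  match fuel with
  | 0 => (factors, n)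
  | f + 1 =>
    if d * d ≤ n then
      let r := pvInnerA (n.toNat + 1) d n factors
      pvOuterA f (d + 1) r.2 r.1
    else (factors, n)

-- body of A's `for i in range(2, limit+1)` loop; state = (current, sequence)
def pvStepA (limit seed : Int) (st : Int × List Int) (i : Int) : Int × List Int :=
  let r := pvOuterA (i.toNat + 1) 2 i []
  let factors := if r.2 > 1 then r.1 ++ [r.2] else r.1
  let current :=
    if factors ≠ [] then PySem.Int.mod (st.1 + factors.sum * seed) limit
    else PySem.Int.mod (st.1 + seed) limit
  (current, st.2 ++ [current])

def prime_factor_sequence (limit : Int) (seed : Int) : List Int :=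
  ((PySem.List.pyRange 2 (limit + 1) 1).foldl (pvStepA limit seed) (seed, [])).2

-- ===== PORT B =====
-- `while d * d <= n and n % d: d += 1` of B's _sopf
def pvFindD (fuel : Nat) (n d : Int) : Int :=
  match fuel with
  | 0 => d
  | f + 1 =>
    if d * d ≤ n ∧ PySem.Int.mod n d ≠ 0 then pvFindD f n (d + 1) else d

-- recursive _sopf of B
def pvSopf (fuel : Nat) (n : Int) : Int :=
  match fuel with
  | 0 => 0
  | f + 1 =>
    if n < 2 then 0
    else
      let d := pvFindD (n.toNat + 1) n 2
      let p := if d * d ≤ n then d else n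
      p + pvSopf f (PySem.Int.floordiv n p)

-- body of B's loop; state = (total, out)
def pvStepB (limit seed : Int) (st : Int × List Int) (i : Int) : Int × List Int :=
  let total := st.1 + pvSopf (i.toNat + 1) i
  (total, st.2 ++ [PySem.Int.mod (seed * total) limit])

def prime_factor_sequence_alt (limit : Int) (seed : Int) : List Int :=
  ((PySem.List.pyRange 2 (limit + 1) 1).foldl (pvStepB limit seed) (1, [])).2

-- ===== PRECONDITION & SPEC =====
def Spec_prime_factor_sequence (limit : Int) (seed : Int) (out : List Int) : Prop := out = prime_factor_sequence_alt limit seed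
instance (limit : Int) (seed : Int) (out : List Int) : Decidable (Spec_prime_factor_sequence limit seed out) := by unfold Spec_prime_factor_sequence; infer_instance

-- ===== CLAIM (what is proved, stated in full; the proofs are below) =====
def Claim_equal_prime_factor_sequence : Prop := ∀ (limit : Int) (seed : Int), Dom_prime_factor_sequence limit seed → Spec_prime_factor_sequence limit seed (prime_factor_sequence limit seed)

-- ===== LEMMAS AND PROOFS =====

-- the common mathematical value: sum of prime factors with multiplicity
def pvS (n : Int) : Int := ((Nat.primeFactorsList n.toNat).sum : Int)

-- a divisor with no smaller divisor ≥ 2 is prime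
lemma pv_prime_of_min (d n : Int) (hn : 1 ≤ n) (hd : 2 ≤ d) (hdvd : d ∣ n)
    (hmin : ∀ e : Int, 2 ≤ e → e < d → ¬ e ∣ n) : d.toNat.Prime := by
  rw [Nat.prime_def_lt']
  refine ⟨by omega, fun m hm2 hmlt hmdvd => ?_⟩
  have hcast : ((d.toNat : Int)) = d := Int.toNat_of_nonneg (by omega)
  have h1 : (m : Int) ∣ d := by
    have := Int.natCast_dvd_natCast.mpr hmdvd
    rwa [hcast] at this
  exact hmin m (by exact_mod_cast hm2) (by omega) (h1.trans hdvd)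

-- n ≥ 2 with no divisor in [2, d) and n < d*d is prime
lemma pv_prime_of_large (d n : Int) (hd : 2 ≤ d) (hn : 2 ≤ n) (hlt : n < d * d)
    (hmin : ∀ e : Int, 2 ≤ e → e < d → ¬ e ∣ n) : n.toNat.Prime := by
  have hcast : ((n.toNat : Int)) = n := Int.toNat_of_nonneg (by omega)
  rw [Nat.prime_def_le_sqrt]
  refine ⟨by omega, fun m hm2 hms hmdvd => ?_⟩
  have hmm : m * m ≤ n.toNat := Nat.le_sqrt.mp hms
  have hmmi : (m : Int) * (m : Int) ≤ n := by
    have := Int.ofNat_le.mpr hmm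
    push_cast at this
    omega
  have hmd : (m : Int) < d := by
    by_contra hcon
    push_neg at hcon
    nlinarith
  have h1 : (m : Int) ∣ n := by
    have := Int.natCast_dvd_natCast.mpr hmdvd
    rwa [hcast] at this
  exact hmin m (by exact_mod_cast hm2) hmd h1

lemma pvS_one : pvS 1 = 0 := by
  unfold pvS
  rw [show (1 : Int).toNat = 1 from rfl, Nat.primeFactorsList_one]
  rfl

lemma pvS_prime (n : Int) (h2 : 2 ≤ n) (hp : n.toNat.Prime) : pvS n = n := by
  unfold pvS
  rw [Nat.primeFactorsList_prime hp]
  simp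
  omega

-- stripping one prime factor
lemma pvS_mul_prime (p m : Int) (hp : p.toNat.Prime) (h2 : 2 ≤ p) (hm : 1 ≤ m) :
    pvS (p * m) = p + pvS m := by
  unfold pvS
  rw [Int.toNat_mul (by omega) (by omega)]
  have hperm := Nat.perm_primeFactorsList_mul (a := p.toNat) (b := m.toNat)
    (by omega) (by omega)
  rw [hperm.sum_eq, List.sum_append, Nat.primeFactorsList_prime hp]
  simp
  omega

-- at loop exit (n < d*d, no small divisors): leftover contributes `if 1 < n then n else 0`
lemma pv_exit (d n : Int) (hd : 2 ≤ d) (hn : 1 ≤ n) (hlt : n < d * d)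
    (hmin : ∀ e : Int, 2 ≤ e → e < d → ¬ e ∣ n) :
    (if 1 < n then n else 0) = pvS n := by
  by_cases h1 : 1 < n
  · rw [if_pos h1, pvS_prime n (by omega) (pv_prime_of_large d n hd (by omega) hlt hmin)]
  · rw [if_neg h1]
    have : n = 1 := by omega
    subst this
    exact pvS_one.symm

lemma pvInnerA_spec (fuel : Nat) (d n : Int) (acc : List Int)
    (hn : 1 ≤ n) (hd : 2 ≤ d) (hmin : ∀ e : Int, 2 ≤ e → e < d → ¬ e ∣ n)
    (hfuel : n.toNat < fuel) :
    ∃ fs m, pvInnerA fuel d n acc = (acc ++ fs, m) ∧ 1 ≤ m ∧ m ∣ n ∧ ¬ d ∣ m ∧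
      (fs.sum + pvS m = pvS n) ∧ (fs = [] → m = n) := by
  induction fuel generalizing n acc with
  | zero => omega
  | succ f ih =>
    simp only [pvInnerA]
    by_cases hdvd : PySem.Int.mod n d = 0
    · rw [if_pos hdvd]
      have hddvd : d ∣ n := (PySem.Int.mod_eq_zero_iff_dvd n d).mp hdvd
      have hdp : d.toNat.Prime := pv_prime_of_min d n hn hd hddvd hmin
      have hfd : PySem.Int.floordiv n d = n / d := PySem.Int.floordiv_eq_ediv_of_pos (by omega)
      set n' := n / d with hn'def
      have hne : n = d * n' := (Int.mul_ediv_cancel' hddvd).symm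
      have hn' : 1 ≤ n' := by nlinarith
      have hlt : n' < n := by nlinarith
      have hdvd' : n' ∣ n := ⟨d, by rw [hne]; ring⟩
      have hmin' : ∀ e : Int, 2 ≤ e → e < d → ¬ e ∣ n' :=
        fun e he hel hed => hmin e he hel (hed.trans hdvd')
      obtain ⟨fs, m, heq, hm1, hmdvd, hnd, hsum, hemp⟩ :=
        ih n' (acc ++ [d]) hn' hmin' (by omega)
      refine ⟨[d] ++ fs, m, ?_, hm1, hmdvd.trans hdvd', hnd, ?_, ?_⟩
      · rw [hfd, heq]
        simp
      · have hSn : pvS n = d + pvS n' := by rw [hne]; exact pvS_mul_prime d n' hdp hd hn'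
        simp only [List.sum_append, List.sum_cons, List.sum_nil]
        omega
      · intro h
        simp at h
    · rw [if_neg hdvd]
      refine ⟨[], n, by simp, hn, dvd_rfl, ?_, by simp, fun _ => rfl⟩
      intro hc
      exact hdvd ((PySem.Int.mod_eq_zero_iff_dvd n d).mpr hc)

lemma pvOuterA_spec (fuel : Nat) (d n : Int) (acc : List Int)
    (hn : 1 ≤ n) (hd : 2 ≤ d) (hmin : ∀ e : Int, 2 ≤ e → e < d → ¬ e ∣ n)
    (hfuel : n < (d + fuel) * (d + fuel)) :
    ∃ fs m, pvOuterA fuel d n acc = (acc ++ fs, m) ∧ 1 ≤ m ∧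
      (fs.sum + (if 1 < m then m else 0) = pvS n) ∧ (fs = [] → m = n) := by
  induction fuel generalizing d n acc with
  | zero =>
    refine ⟨[], n, by simp [pvOuterA], hn, ?_, fun _ => rfl⟩
    have hdd : n < d * d := by push_cast at hfuel; nlinarith
    have := pv_exit d n hd hn hdd hmin
    simp only [List.sum_nil]
    omega
  | succ f ih =>
    simp only [pvOuterA]
    by_cases hc : d * d ≤ n
    · rw [if_pos hc]
      obtain ⟨fs₁, m₁, h1, hm₁, hm₁dvd, hnd, hsum₁, hemp₁⟩ :=
        pvInnerA_spec (n.toNat + 1) d n acc hn hd hmin (by omega)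
      rw [h1]
      have hmin' : ∀ e : Int, 2 ≤ e → e < d + 1 → ¬ e ∣ m₁ := by
        intro e he hel hed
        rcases (by omega : e < d ∨ e = d) with h | h
        · exact hmin e he h (hed.trans hm₁dvd)
        · exact hnd (h ▸ hed)
      have hfuel' : m₁ < (d + 1 + (f : Int)) * (d + 1 + (f : Int)) := by
        have hle : m₁ ≤ n := Int.le_of_dvd (by omega) hm₁dvd
        push_cast at hfuel ⊢
        nlinarith
      obtain ⟨fs₂, m, h2, hm, hsum₂, hemp₂⟩ :=
        ih (d + 1) m₁ (acc ++ fs₁) hm₁ (by omega) hmin' hfuel'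
      refine ⟨fs₁ ++ fs₂, m, by rw [h2]; simp, hm, ?_, ?_⟩
      · simp only [List.sum_append]
        omega
      · intro h
        simp only [List.append_eq_nil_iff] at h
        rw [hemp₂ h.2, hemp₁ h.1]
    · rw [if_neg hc]
      refine ⟨[], n, by simp, hn, ?_, fun _ => rfl⟩
      have := pv_exit d n hd hn (not_le.mp hc) hmin
      simp only [List.sum_nil]
      omega

-- A's loop body produces current = (c + pvS i * seed) % limit
lemma pvStepA_eq (limit seed c i : Int) (out : List Int) (hi : 2 ≤ i) :
    pvStepA limit seed (c, out) i =
      (PySem.Int.mod (c + pvS i * seed) limit,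
       out ++ [PySem.Int.mod (c + pvS i * seed) limit]) := by
  have hti : ((i.toNat : Int)) = i := Int.toNat_of_nonneg (by omega)
  obtain ⟨fs, m, heq, hm, hsum, hemp⟩ :=
    pvOuterA_spec (i.toNat + 1) 2 i [] (by omega) (by omega)
      (fun e he hel _ => by omega) (by push_cast [hti]; nlinarith)
  unfold pvStepA
  rw [heq]
  simp only [List.nil_append]
  have hfact : (if m > 1 then fs ++ [m] else fs) ≠ [] ∧
      (if m > 1 then fs ++ [m] else fs).sum = pvS i := by
    by_cases h1 : 1 < m
    · simp only [gt_iff_lt, if_pos h1]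
      refine ⟨by simp, ?_⟩
      rw [if_pos h1] at hsum
      simp only [List.sum_append, List.sum_cons, List.sum_nil]
      omega
    · simp only [gt_iff_lt, if_neg h1]
      have hfs : fs ≠ [] := by
        intro h
        have := hemp h
        omega
      refine ⟨hfs, ?_⟩
      rw [if_neg h1] at hsum
      omega
  rw [if_pos hfact.1, hfact.2]

lemma pvFindD_spec (fuel : Nat) (n d : Int) (hn : 1 ≤ n) (hd : 2 ≤ d)
    (hmin : ∀ e : Int, 2 ≤ e → e < d → ¬ e ∣ n)
    (hfuel : n < (d + fuel) * (d + fuel)) :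
    2 ≤ pvFindD fuel n d ∧ (∀ e : Int, 2 ≤ e → e < pvFindD fuel n d → ¬ e ∣ n) ∧
      (pvFindD fuel n d * pvFindD fuel n d ≤ n → pvFindD fuel n d ∣ n) := by
  induction fuel generalizing d with
  | zero =>
    simp only [pvFindD]
    refine ⟨hd, hmin, fun h => ?_⟩
    push_cast at hfuel
    nlinarith
  | succ f ih =>
    simp only [pvFindD]
    by_cases hc : d * d ≤ n ∧ PySem.Int.mod n d ≠ 0
    · rw [if_pos hc]
      have hnd : ¬ d ∣ n := fun h => hc.2 ((PySem.Int.mod_eq_zero_iff_dvd n d).mpr h)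
      have hmin' : ∀ e : Int, 2 ≤ e → e < d + 1 → ¬ e ∣ n := by
        intro e he hel
        rcases (by omega : e < d ∨ e = d) with h | h
        · exact hmin e he h
        · exact h ▸ hnd
      exact ih (d + 1) (by omega) hmin' (by push_cast at hfuel ⊢; nlinarith)
    · rw [if_neg hc]
      push_neg at hc
      refine ⟨hd, hmin, fun h => ?_⟩
      exact (PySem.Int.mod_eq_zero_iff_dvd n d).mp (hc h)

lemma pvSopf_spec (fuel : Nat) (n : Int) (hn : 1 ≤ n) (hfuel : n.toNat < fuel) :
    pvSopf fuel n = pvS n := by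
  induction fuel generalizing n with
  | zero => omega
  | succ f ih =>
    simp only [pvSopf]
    by_cases h2 : n < 2
    · rw [if_pos h2]
      have : n = 1 := by omega
      subst this
      exact pvS_one.symm
    · rw [if_neg h2]
      have hti : ((n.toNat : Int)) = n := Int.toNat_of_nonneg (by omega)
      obtain ⟨hd2, hmind, hdiv⟩ :=
        pvFindD_spec (n.toNat + 1) n 2 hn (by omega)
          (fun e he hel => by omega) (by push_cast [hti]; nlinarith)
      set d := pvFindD (n.toNat + 1) n 2 with hddef
      by_cases hps : d * d ≤ n
      · rw [if_pos hps]
        have hddvd : d ∣ n := hdiv hps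
        have hdp : d.toNat.Prime := pv_prime_of_min d n hn hd2 hddvd hmind
        have hfd : PySem.Int.floordiv n d = n / d := PySem.Int.floordiv_eq_ediv_of_pos (by omega)
        have hne : n = d * (n / d) := (Int.mul_ediv_cancel' hddvd).symm
        have hn' : 1 ≤ n / d := by nlinarith
        have hlt : n / d < n := by nlinarith
        rw [hfd, ih (n / d) hn' (by omega)]
        have := pvS_mul_prime d (n / d) hdp hd2 hn'
        rw [← hne] at this
        omega
      · rw [if_neg hps]
        have hnp : n.toNat.Prime := pv_prime_of_large d n hd2 (by omega) (not_le.mp hps) hmind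
        have hfd : PySem.Int.floordiv n n = 1 := by
          rw [PySem.Int.floordiv_eq_ediv_of_pos (by omega)]
          exact Int.ediv_self (by omega)
        rw [hfd, ih 1 (by omega) (by omega), pvS_one, pvS_prime n (by omega) hnp]
        ring

lemma pvStepB_eq (limit seed t i : Int) (out : List Int) (hi : 2 ≤ i) :
    pvStepB limit seed (t, out) i =
      (t + pvS i, out ++ [PySem.Int.mod (seed * (t + pvS i)) limit]) := by
  unfold pvStepB
  rw [pvSopf_spec (i.toNat + 1) i (by omega) (by omega)]

-- modular bookkeeping: (c % L + x) % L = (c + x) % L for L > 0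
lemma pv_mod_shift (c x L : Int) (hL : 0 < L) :
    PySem.Int.mod (PySem.Int.mod c L + x) L = PySem.Int.mod (c + x) L := by
  rw [PySem.Int.mod_eq_emod_of_pos hL, PySem.Int.mod_eq_emod_of_pos hL,
    PySem.Int.mod_eq_emod_of_pos hL, Int.emod_def c L]
  have h : c - L * (c / L) + x = (c + x) + L * (-(c / L)) := by ring
  rw [h, Int.add_mul_emod_self_left]

lemma pv_fold_eq (L : List Int) (limit seed : Int) (hL : 0 < limit) :
    ∀ (c t : Int) (out : List Int),
      (∀ i ∈ L, 2 ≤ i) →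
      PySem.Int.mod c limit = PySem.Int.mod (seed * t) limit →
      (L.foldl (pvStepA limit seed) (c, out)).2 =
      (L.foldl (pvStepB limit seed) (t, out)).2 := by
  induction L with
  | nil => intro c t out _ _; rfl
  | cons i L ih =>
    intro c t out hall hinv
    have hi : 2 ≤ i := hall i (List.mem_cons_self ..)
    simp only [List.foldl_cons]
    rw [pvStepA_eq limit seed c i out hi, pvStepB_eq limit seed t i out hi]
    have hhead : PySem.Int.mod (c + pvS i * seed) limit =
        PySem.Int.mod (seed * (t + pvS i)) limit := by
      rw [← pv_mod_shift c (pvS i * seed) limit hL, hinv,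
        pv_mod_shift (seed * t) (pvS i * seed) limit hL]
      ring_nf
    rw [hhead]
    apply ih
    · exact fun j hj => hall j (List.mem_cons_of_mem _ hj)
    · rw [PySem.Int.mod_eq_emod_of_pos hL, PySem.Int.mod_eq_emod_of_pos hL]
      exact Int.emod_emod_of_dvd _ dvd_rfl

-- ===== VERDICT (by name: the statement is the Claim_ definition above) =====
theorem prime_factor_sequence_spec : Claim_equal_prime_factor_sequence := by
  intro limit seed _
  unfold Spec_prime_factor_sequence prime_factor_sequence prime_factor_sequence_alt
  by_cases h : limit + 1 ≤ 2
  · rw [PySem.List.pyRange_one_eq_nil h]; rfl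
  · have hL : 0 < limit := by omega
    apply pv_fold_eq _ _ _ hL
    · intro i hi
      have := (PySem.List.mem_pyRange_one.mp hi).1
      omega
    · rw [mul_one]
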